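-- pv_equiv track=rewrite | github.com/medinovai-health/medinovai-1in-kubernetes | clone_myonsite_healthcare_repos.py | categorize_repository
-- ===== SOURCE A (Python) =====
-- from typing import List, Dict, Set, Optional
--
-- def categorize_repository(repo: Dict) -> str:
--     """Categorize repository based on name and description"""
--     name = repo.get('name', '').lower()
--     description = repo.get('description', '').lower()
--
--     # Core services
--     if any(keyword in name for keyword in ['api', 'auth', 'service', 'core', 'platform']):
--         return 'core-services'
--
--     # Data services
--     if any(keyword in name for keyword in ['data', 'analytics', 'ml', 'ai', 'database']):
--         return 'data-services'
--
--     # UI/Frontend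
--     if any(keyword in name for keyword in ['ui', 'frontend', 'web', 'dashboard', 'portal', 'app']):
--         return 'ui-frontend'
--
--     # Infrastructure
--     if any(keyword in name for keyword in ['infrastructure', 'terraform', 'k8s', 'kubernetes', 'docker', 'deploy']):
--         return 'infrastructure'
--
--     # Libraries/SDKs
--     if any(keyword in name for keyword in ['lib', 'sdk', 'utils', 'common', 'shared']):
--         return 'libraries-sdks'
--
--     # Documentation
--     if any(keyword in name for keyword in ['doc', 'wiki', 'guide', 'manual']):
--         return 'documentation'
--
--     # Tools/Utilities
--     if any(keyword in name for keyword in ['tool', 'script', 'util', 'helper']):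
--         return 'tools-utilities'
--
--     # Default to core-services
--     return 'core-services'
-- ===== SOURCE B (Python) =====
-- # Flat keyword->priority map; category = min priority among ALL matching keywords.
-- KEYWORD_RANK = {
--     'api': 0, 'auth': 0, 'service': 0, 'core': 0, 'platform': 0,
--     'data': 1, 'analytics': 1, 'ml': 1, 'ai': 1, 'database': 1,
--     'ui': 2, 'frontend': 2, 'web': 2, 'dashboard': 2, 'portal': 2, 'app': 2,
--     'infrastructure': 3, 'terraform': 3, 'k8s': 3, 'kubernetes': 3, 'docker': 3, 'deploy': 3,
--     'lib': 4, 'sdk': 4, 'utils': 4, 'common': 4, 'shared': 4,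
--     'doc': 5, 'wiki': 5, 'guide': 5, 'manual': 5,
--     'tool': 6, 'script': 6, 'util': 6, 'helper': 6,
-- }
--
-- CATEGORY_NAMES = ['core-services', 'data-services', 'ui-frontend', 'infrastructure',
--                   'libraries-sdks', 'documentation', 'tools-utilities']
--
--
-- def categorize_repository(repo):
--     """Categorize repository: minimal priority rank over all matching keywords."""
--     name = repo.get('name', '').lower()
--     description = repo.get('description', '').lower()  # kept: A computes it too
--     ranks = [rank for kw, rank in KEYWORD_RANK.items() if kw in name]
--     return CATEGORY_NAMES[min(ranks)] if ranks else 'core-services'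
-- ===== Notes on version B (the rewrite author's own statement) =====
-- stated objective: alternative
-- what changed: Replaces A's priority if-chain of per-category any() scans with one flat keyword-to-rank map: collect the ranks of ALL keywords occurring in the name and return the category of the minimum rank (default when nothing matches).
import Mathlib
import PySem

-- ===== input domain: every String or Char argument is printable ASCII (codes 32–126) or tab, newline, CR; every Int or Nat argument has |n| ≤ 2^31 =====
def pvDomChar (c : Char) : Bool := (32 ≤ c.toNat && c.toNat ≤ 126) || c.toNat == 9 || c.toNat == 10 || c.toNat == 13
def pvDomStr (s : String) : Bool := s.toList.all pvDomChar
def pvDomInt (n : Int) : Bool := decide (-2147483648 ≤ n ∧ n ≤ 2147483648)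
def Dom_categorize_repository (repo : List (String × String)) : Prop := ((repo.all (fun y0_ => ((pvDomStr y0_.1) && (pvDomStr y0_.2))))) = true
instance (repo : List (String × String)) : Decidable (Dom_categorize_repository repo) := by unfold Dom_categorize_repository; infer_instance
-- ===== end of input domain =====

-- B replaces A's priority if-chain of per-category any() scans with a flat keyword->rank
-- map: it collects the ranks of ALL matching keywords and returns the category of the
-- minimum rank (alternative decomposition; same return value on every input).


-- ===== PORT A =====
def categorize_repository (repo : List (String × String)) : String :=
  let name := PySem.Str.lower (PySem.Dict.getD (PySem.Dict.mk repo) "name" "")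
  let _description := PySem.Str.lower (PySem.Dict.getD (PySem.Dict.mk repo) "description" "")
  if ["api", "auth", "service", "core", "platform"].any (fun kw => PySem.Str.isIn kw name) then
    "core-services"
  else if ["data", "analytics", "ml", "ai", "database"].any (fun kw => PySem.Str.isIn kw name) then
    "data-services"
  else if ["ui", "frontend", "web", "dashboard", "portal", "app"].any (fun kw => PySem.Str.isIn kw name) then
    "ui-frontend"
  else if ["infrastructure", "terraform", "k8s", "kubernetes", "docker", "deploy"].any (fun kw => PySem.Str.isIn kw name) then
    "infrastructure"
  else if ["lib", "sdk", "utils", "common", "shared"].any (fun kw => PySem.Str.isIn kw name) then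
    "libraries-sdks"
  else if ["doc", "wiki", "guide", "manual"].any (fun kw => PySem.Str.isIn kw name) then
    "documentation"
  else if ["tool", "script", "util", "helper"].any (fun kw => PySem.Str.isIn kw name) then
    "tools-utilities"
  else
    "core-services"

-- ===== PORT B =====
-- the flat KEYWORD_RANK dict (distinct keys, insertion order) as an association list
def pvKEYWORD_RANK : List (String × Nat) :=
  [("api", 0), ("auth", 0), ("service", 0), ("core", 0), ("platform", 0),
   ("data", 1), ("analytics", 1), ("ml", 1), ("ai", 1), ("database", 1),
   ("ui", 2), ("frontend", 2), ("web", 2), ("dashboard", 2), ("portal", 2), ("app", 2),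
   ("infrastructure", 3), ("terraform", 3), ("k8s", 3), ("kubernetes", 3), ("docker", 3), ("deploy", 3),
   ("lib", 4), ("sdk", 4), ("utils", 4), ("common", 4), ("shared", 4),
   ("doc", 5), ("wiki", 5), ("guide", 5), ("manual", 5),
   ("tool", 6), ("script", 6), ("util", 6), ("helper", 6)]

def pvCATEGORY_NAMES : List String :=
  ["core-services", "data-services", "ui-frontend", "infrastructure",
   "libraries-sdks", "documentation", "tools-utilities"]

def categorize_repository_alt (repo : List (String × String)) : String :=
  let name := PySem.Str.lower (PySem.Dict.getD (PySem.Dict.mk repo) "name" "")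
  let _description := PySem.Str.lower (PySem.Dict.getD (PySem.Dict.mk repo) "description" "")
  -- ranks = [rank for kw, rank in KEYWORD_RANK.items() if kw in name]
  let ranks := (pvKEYWORD_RANK.filter (fun p => PySem.Str.isIn p.1 name)).map Prod.snd
  -- CATEGORY_NAMES[min(ranks)] if ranks else 'core-services'
  -- (min(ranks) is always 0..6 here, so CATEGORY_NAMES[..] never raises; pyGetD is exact)
  match PySem.List.min? ranks (fun x => x) with
  | some m => PySem.List.pyGetD pvCATEGORY_NAMES (m : Int) ""
  | none => "core-services"

-- ===== PRECONDITION & SPEC =====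
def Spec_categorize_repository (repo : List (String × String)) (out : String) : Prop := out = categorize_repository_alt repo
instance (repo : List (String × String)) (out : String) : Decidable (Spec_categorize_repository repo out) := by unfold Spec_categorize_repository; infer_instance

-- ===== CLAIM (what is proved, stated in full; the proofs are below) =====
def Claim_equal_categorize_repository : Prop := ∀ (repo : List (String × String)), Dom_categorize_repository repo → Spec_categorize_repository repo (categorize_repository repo)

-- ===== LEMMAS AND PROOFS =====

-- min of a nonempty Nat list whose least element is m
theorem pv_min_some (l : List Nat) (m : Nat) (hm : m ∈ l) (hmin : ∀ y ∈ l, m ≤ y) :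
    PySem.List.min? l (fun x => x) = some m := by
  cases h : PySem.List.min? l (fun x => x) with
  | none =>
      rw [PySem.List.min?_eq_none_iff] at h
      subst h; simp at hm
  | some m' =>
      have h1 : m' ∈ l := PySem.List.min?_mem h
      have h2 := PySem.List.min?_isMin h m hm
      have h3 := hmin m' h1
      simp only [Option.some.injEq]
      omega

-- the filtered/mapped contribution of one keyword group with constant rank r
theorem pv_group (l : List String) (r : Nat) (f : String → Bool) :
    ((l.map (fun kw => (kw, r))).filter (fun p => f p.1)).map Prod.snd
      = List.replicate (l.countP f) r := by
  induction l with
  | nil => simp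
  | cons a t ih =>
      by_cases h : f a = true
      · simp [h, List.replicate_succ, ih]
      · simp only [Bool.not_eq_true] at h
        simp [h, ih]

-- shared abbreviations for the seven keyword groups (proof-only)
theorem pv_flat (f : String → Bool) :
    (pvKEYWORD_RANK.filter (fun p => f p.1)).map Prod.snd
      = List.replicate (["api", "auth", "service", "core", "platform"].countP f) 0
        ++ List.replicate (["data", "analytics", "ml", "ai", "database"].countP f) 1
        ++ List.replicate (["ui", "frontend", "web", "dashboard", "portal", "app"].countP f) 2
        ++ List.replicate (["infrastructure", "terraform", "k8s", "kubernetes", "docker", "deploy"].countP f) 3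
        ++ List.replicate (["lib", "sdk", "utils", "common", "shared"].countP f) 4
        ++ List.replicate (["doc", "wiki", "guide", "manual"].countP f) 5
        ++ List.replicate (["tool", "script", "util", "helper"].countP f) 6 := by
  have h : pvKEYWORD_RANK
      = (["api", "auth", "service", "core", "platform"].map (fun kw => (kw, (0:Nat))))
        ++ (["data", "analytics", "ml", "ai", "database"].map (fun kw => (kw, (1:Nat))))
        ++ (["ui", "frontend", "web", "dashboard", "portal", "app"].map (fun kw => (kw, (2:Nat))))
        ++ (["infrastructure", "terraform", "k8s", "kubernetes", "docker", "deploy"].map (fun kw => (kw, (3:Nat))))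
        ++ (["lib", "sdk", "utils", "common", "shared"].map (fun kw => (kw, (4:Nat))))
        ++ (["doc", "wiki", "guide", "manual"].map (fun kw => (kw, (5:Nat))))
        ++ (["tool", "script", "util", "helper"].map (fun kw => (kw, (6:Nat)))) := by rfl
  rw [h]
  simp only [List.filter_append, List.map_append, pv_group]

-- countP = 0 exactly when the group's any() test fails
theorem pv_any_countP (l : List String) (f : String → Bool) :
    l.any f = false ↔ l.countP f = 0 := by
  rw [List.any_eq_false, List.countP_eq_zero]

-- every element of an append / a replicate is ≥ k (proof helpers)
theorem pv_ge_append {k : Nat} {l1 l2 : List Nat} (g1 : ∀ y ∈ l1, k ≤ y) (g2 : ∀ y ∈ l2, k ≤ y) :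
    ∀ y ∈ l1 ++ l2, k ≤ y := by
  intro y hy
  rcases List.mem_append.mp hy with h | h
  · exact g1 y h
  · exact g2 y h

theorem pv_ge_repl {k r n : Nat} (h : k ≤ r) : ∀ y ∈ List.replicate n r, k ≤ y := by
  intro y hy
  rw [List.eq_of_mem_replicate hy]
  exact h

-- the core equivalence, with the membership test abstracted to f
theorem pv_main (f : String → Bool) :
    (match PySem.List.min? ((pvKEYWORD_RANK.filter (fun p => f p.1)).map Prod.snd) (fun x => x) with
     | some m => PySem.List.pyGetD pvCATEGORY_NAMES (m : Int) ""
     | none => "core-services")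
    = (if ["api", "auth", "service", "core", "platform"].any f then "core-services"
       else if ["data", "analytics", "ml", "ai", "database"].any f then "data-services"
       else if ["ui", "frontend", "web", "dashboard", "portal", "app"].any f then "ui-frontend"
       else if ["infrastructure", "terraform", "k8s", "kubernetes", "docker", "deploy"].any f then "infrastructure"
       else if ["lib", "sdk", "utils", "common", "shared"].any f then "libraries-sdks"
       else if ["doc", "wiki", "guide", "manual"].any f then "documentation"
       else if ["tool", "script", "util", "helper"].any f then "tools-utilities"
       else "core-services") := by
  rw [pv_flat f]
  by_cases h1 : ["api", "auth", "service", "core", "platform"].any f = true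
  · have hc : 0 < ["api", "auth", "service", "core", "platform"].countP f := by
      rcases List.any_eq_true.mp h1 with ⟨a, ha, hfa⟩
      exact List.countP_pos_iff.mpr ⟨a, ha, hfa⟩
    have hmem : (0 : Nat) ∈ List.replicate (["api", "auth", "service", "core", "platform"].countP f) 0 ++ List.replicate (["data", "analytics", "ml", "ai", "database"].countP f) 1 ++ List.replicate (["ui", "frontend", "web", "dashboard", "portal", "app"].countP f) 2 ++ List.replicate (["infrastructure", "terraform", "k8s", "kubernetes", "docker", "deploy"].countP f) 3 ++ List.replicate (["lib", "sdk", "utils", "common", "shared"].countP f) 4 ++ List.replicate (["doc", "wiki", "guide", "manual"].countP f) 5 ++ List.replicate (["tool", "script", "util", "helper"].countP f) 6 :=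
      List.mem_append_left _ (List.mem_append_left _ (List.mem_append_left _ (List.mem_append_left _ (List.mem_append_left _ (List.mem_append_left _ (List.mem_replicate.mpr ⟨Nat.pos_iff_ne_zero.mp hc, rfl⟩))))))
    have hge : ∀ y ∈ List.replicate (["api", "auth", "service", "core", "platform"].countP f) 0 ++ List.replicate (["data", "analytics", "ml", "ai", "database"].countP f) 1 ++ List.replicate (["ui", "frontend", "web", "dashboard", "portal", "app"].countP f) 2 ++ List.replicate (["infrastructure", "terraform", "k8s", "kubernetes", "docker", "deploy"].countP f) 3 ++ List.replicate (["lib", "sdk", "utils", "common", "shared"].countP f) 4 ++ List.replicate (["doc", "wiki", "guide", "manual"].countP f) 5 ++ List.replicate (["tool", "script", "util", "helper"].countP f) 6, 0 ≤ y :=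
      pv_ge_append (pv_ge_append (pv_ge_append (pv_ge_append (pv_ge_append (pv_ge_append (pv_ge_repl (Nat.le_refl 0)) (pv_ge_repl (by omega))) (pv_ge_repl (by omega))) (pv_ge_repl (by omega))) (pv_ge_repl (by omega))) (pv_ge_repl (by omega))) (pv_ge_repl (by omega))
    rw [pv_min_some _ 0 hmem hge]
    simp only [h1, if_true]
    decide
  · rw [Bool.not_eq_true] at h1
    rw [(pv_any_countP _ f).mp h1]
    simp only [List.replicate_zero, List.nil_append]
    by_cases h2 : ["data", "analytics", "ml", "ai", "database"].any f = true
    · have hc : 0 < ["data", "analytics", "ml", "ai", "database"].countP f := by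
        rcases List.any_eq_true.mp h2 with ⟨a, ha, hfa⟩
        exact List.countP_pos_iff.mpr ⟨a, ha, hfa⟩
      have hmem : (1 : Nat) ∈ List.replicate (["data", "analytics", "ml", "ai", "database"].countP f) 1 ++ List.replicate (["ui", "frontend", "web", "dashboard", "portal", "app"].countP f) 2 ++ List.replicate (["infrastructure", "terraform", "k8s", "kubernetes", "docker", "deploy"].countP f) 3 ++ List.replicate (["lib", "sdk", "utils", "common", "shared"].countP f) 4 ++ List.replicate (["doc", "wiki", "guide", "manual"].countP f) 5 ++ List.replicate (["tool", "script", "util", "helper"].countP f) 6 :=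
        List.mem_append_left _ (List.mem_append_left _ (List.mem_append_left _ (List.mem_append_left _ (List.mem_append_left _ (List.mem_replicate.mpr ⟨Nat.pos_iff_ne_zero.mp hc, rfl⟩)))))
      have hge : ∀ y ∈ List.replicate (["data", "analytics", "ml", "ai", "database"].countP f) 1 ++ List.replicate (["ui", "frontend", "web", "dashboard", "portal", "app"].countP f) 2 ++ List.replicate (["infrastructure", "terraform", "k8s", "kubernetes", "docker", "deploy"].countP f) 3 ++ List.replicate (["lib", "sdk", "utils", "common", "shared"].countP f) 4 ++ List.replicate (["doc", "wiki", "guide", "manual"].countP f) 5 ++ List.replicate (["tool", "script", "util", "helper"].countP f) 6, 1 ≤ y :=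
        pv_ge_append (pv_ge_append (pv_ge_append (pv_ge_append (pv_ge_append (pv_ge_repl (Nat.le_refl 1)) (pv_ge_repl (by omega))) (pv_ge_repl (by omega))) (pv_ge_repl (by omega))) (pv_ge_repl (by omega))) (pv_ge_repl (by omega))
      rw [pv_min_some _ 1 hmem hge]
      simp only [h1, h2, Bool.false_eq_true, if_true, if_false]
      decide
    · rw [Bool.not_eq_true] at h2
      rw [(pv_any_countP _ f).mp h2]
      simp only [List.replicate_zero, List.nil_append]
      by_cases h3 : ["ui", "frontend", "web", "dashboard", "portal", "app"].any f = true
      · have hc : 0 < ["ui", "frontend", "web", "dashboard", "portal", "app"].countP f := by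
          rcases List.any_eq_true.mp h3 with ⟨a, ha, hfa⟩
          exact List.countP_pos_iff.mpr ⟨a, ha, hfa⟩
        have hmem : (2 : Nat) ∈ List.replicate (["ui", "frontend", "web", "dashboard", "portal", "app"].countP f) 2 ++ List.replicate (["infrastructure", "terraform", "k8s", "kubernetes", "docker", "deploy"].countP f) 3 ++ List.replicate (["lib", "sdk", "utils", "common", "shared"].countP f) 4 ++ List.replicate (["doc", "wiki", "guide", "manual"].countP f) 5 ++ List.replicate (["tool", "script", "util", "helper"].countP f) 6 :=
          List.mem_append_left _ (List.mem_append_left _ (List.mem_append_left _ (List.mem_append_left _ (List.mem_replicate.mpr ⟨Nat.pos_iff_ne_zero.mp hc, rfl⟩))))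
        have hge : ∀ y ∈ List.replicate (["ui", "frontend", "web", "dashboard", "portal", "app"].countP f) 2 ++ List.replicate (["infrastructure", "terraform", "k8s", "kubernetes", "docker", "deploy"].countP f) 3 ++ List.replicate (["lib", "sdk", "utils", "common", "shared"].countP f) 4 ++ List.replicate (["doc", "wiki", "guide", "manual"].countP f) 5 ++ List.replicate (["tool", "script", "util", "helper"].countP f) 6, 2 ≤ y :=
          pv_ge_append (pv_ge_append (pv_ge_append (pv_ge_append (pv_ge_repl (Nat.le_refl 2)) (pv_ge_repl (by omega))) (pv_ge_repl (by omega))) (pv_ge_repl (by omega))) (pv_ge_repl (by omega))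
        rw [pv_min_some _ 2 hmem hge]
        simp only [h1, h2, h3, Bool.false_eq_true, if_true, if_false]
        decide
      · rw [Bool.not_eq_true] at h3
        rw [(pv_any_countP _ f).mp h3]
        simp only [List.replicate_zero, List.nil_append]
        by_cases h4 : ["infrastructure", "terraform", "k8s", "kubernetes", "docker", "deploy"].any f = true
        · have hc : 0 < ["infrastructure", "terraform", "k8s", "kubernetes", "docker", "deploy"].countP f := by
            rcases List.any_eq_true.mp h4 with ⟨a, ha, hfa⟩
            exact List.countP_pos_iff.mpr ⟨a, ha, hfa⟩
          have hmem : (3 : Nat) ∈ List.replicate (["infrastructure", "terraform", "k8s", "kubernetes", "docker", "deploy"].countP f) 3 ++ List.replicate (["lib", "sdk", "utils", "common", "shared"].countP f) 4 ++ List.replicate (["doc", "wiki", "guide", "manual"].countP f) 5 ++ List.replicate (["tool", "script", "util", "helper"].countP f) 6 :=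
            List.mem_append_left _ (List.mem_append_left _ (List.mem_append_left _ (List.mem_replicate.mpr ⟨Nat.pos_iff_ne_zero.mp hc, rfl⟩)))
          have hge : ∀ y ∈ List.replicate (["infrastructure", "terraform", "k8s", "kubernetes", "docker", "deploy"].countP f) 3 ++ List.replicate (["lib", "sdk", "utils", "common", "shared"].countP f) 4 ++ List.replicate (["doc", "wiki", "guide", "manual"].countP f) 5 ++ List.replicate (["tool", "script", "util", "helper"].countP f) 6, 3 ≤ y :=
            pv_ge_append (pv_ge_append (pv_ge_append (pv_ge_repl (Nat.le_refl 3)) (pv_ge_repl (by omega))) (pv_ge_repl (by omega))) (pv_ge_repl (by omega))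
          rw [pv_min_some _ 3 hmem hge]
          simp only [h1, h2, h3, h4, Bool.false_eq_true, if_true, if_false]
          decide
        · rw [Bool.not_eq_true] at h4
          rw [(pv_any_countP _ f).mp h4]
          simp only [List.replicate_zero, List.nil_append]
          by_cases h5 : ["lib", "sdk", "utils", "common", "shared"].any f = true
          · have hc : 0 < ["lib", "sdk", "utils", "common", "shared"].countP f := by
              rcases List.any_eq_true.mp h5 with ⟨a, ha, hfa⟩
              exact List.countP_pos_iff.mpr ⟨a, ha, hfa⟩
            have hmem : (4 : Nat) ∈ List.replicate (["lib", "sdk", "utils", "common", "shared"].countP f) 4 ++ List.replicate (["doc", "wiki", "guide", "manual"].countP f) 5 ++ List.replicate (["tool", "script", "util", "helper"].countP f) 6 :=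
              List.mem_append_left _ (List.mem_append_left _ (List.mem_replicate.mpr ⟨Nat.pos_iff_ne_zero.mp hc, rfl⟩))
            have hge : ∀ y ∈ List.replicate (["lib", "sdk", "utils", "common", "shared"].countP f) 4 ++ List.replicate (["doc", "wiki", "guide", "manual"].countP f) 5 ++ List.replicate (["tool", "script", "util", "helper"].countP f) 6, 4 ≤ y :=
              pv_ge_append (pv_ge_append (pv_ge_repl (Nat.le_refl 4)) (pv_ge_repl (by omega))) (pv_ge_repl (by omega))
            rw [pv_min_some _ 4 hmem hge]
            simp only [h1, h2, h3, h4, h5, Bool.false_eq_true, if_true, if_false]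
            decide
          · rw [Bool.not_eq_true] at h5
            rw [(pv_any_countP _ f).mp h5]
            simp only [List.replicate_zero, List.nil_append]
            by_cases h6 : ["doc", "wiki", "guide", "manual"].any f = true
            · have hc : 0 < ["doc", "wiki", "guide", "manual"].countP f := by
                rcases List.any_eq_true.mp h6 with ⟨a, ha, hfa⟩
                exact List.countP_pos_iff.mpr ⟨a, ha, hfa⟩
              have hmem : (5 : Nat) ∈ List.replicate (["doc", "wiki", "guide", "manual"].countP f) 5 ++ List.replicate (["tool", "script", "util", "helper"].countP f) 6 :=
                List.mem_append_left _ (List.mem_replicate.mpr ⟨Nat.pos_iff_ne_zero.mp hc, rfl⟩)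
              have hge : ∀ y ∈ List.replicate (["doc", "wiki", "guide", "manual"].countP f) 5 ++ List.replicate (["tool", "script", "util", "helper"].countP f) 6, 5 ≤ y :=
                pv_ge_append (pv_ge_repl (Nat.le_refl 5)) (pv_ge_repl (by omega))
              rw [pv_min_some _ 5 hmem hge]
              simp only [h1, h2, h3, h4, h5, h6, Bool.false_eq_true, if_true, if_false]
              decide
            · rw [Bool.not_eq_true] at h6
              rw [(pv_any_countP _ f).mp h6]
              simp only [List.replicate_zero, List.nil_append]
              by_cases h7 : ["tool", "script", "util", "helper"].any f = true
              · have hc : 0 < ["tool", "script", "util", "helper"].countP f := by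
                  rcases List.any_eq_true.mp h7 with ⟨a, ha, hfa⟩
                  exact List.countP_pos_iff.mpr ⟨a, ha, hfa⟩
                have hmem : (6 : Nat) ∈ List.replicate (["tool", "script", "util", "helper"].countP f) 6 :=
                  List.mem_replicate.mpr ⟨Nat.pos_iff_ne_zero.mp hc, rfl⟩
                have hge : ∀ y ∈ List.replicate (["tool", "script", "util", "helper"].countP f) 6, 6 ≤ y :=
                  pv_ge_repl (Nat.le_refl 6)
                rw [pv_min_some _ 6 hmem hge]
                simp only [h1, h2, h3, h4, h5, h6, h7, Bool.false_eq_true, if_true, if_false]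
                decide
              · rw [Bool.not_eq_true] at h7
                rw [(pv_any_countP _ f).mp h7]
                simp only [List.replicate_zero]
                rw [show PySem.List.min? ([] : List Nat) (fun x => x) = none from (PySem.List.min?_eq_none_iff ..).mpr rfl]
                simp only [h1, h2, h3, h4, h5, h6, h7, Bool.false_eq_true, if_false]

-- ===== VERDICT (by name: the statement is the Claim_ definition above) =====
theorem categorize_repository_spec : Claim_equal_categorize_repository := by
  intro repo _
  unfold Spec_categorize_repository
  show categorize_repository repo = categorize_repository_alt repo
  simp only [categorize_repository, categorize_repository_alt]
  exact (pv_main (fun kw => PySem.Str.isIn kw (PySem.Str.lower (PySem.Dict.getD (PySem.Dict.mk repo) "name" "")))).symm
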